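-- pv_equiv track=rewrite | github.com/papanokechi/wallis-pcf-lean4 | ratio_univ_extension.py | compute_overpartitions
-- ===== SOURCE A (Python) =====
-- def compute_overpartitions(N):
--     """pbar(n): prod (1+q^m)/(1-q^m) = prod (1-q^m)^{-1} * prod (1+q^m)."""
--     c = [0] * (N + 1)
--     for j in range(1, N + 1):
--         s = 0
--         d = 1
--         while d * d <= j:
--             if j % d == 0:
--                 q = j // d
--                 if q % 2 == 1:
--                     s += d
--                 if d != q and d % 2 == 1:
--                     s += q
--             d += 1
--         c[j] = 2 * s
--     pbar = [0] * (N + 1)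
--     pbar[0] = 1
--     for n in range(1, N + 1):
--         s = 0
--         for j in range(1, n + 1):
--             s += c[j] * pbar[n - j]
--         pbar[n] = s // n
--     return pbar
-- ===== SOURCE B (Python) =====
-- def compute_overpartitions(N):
--     """pbar(n): prod (1+q^m)/(1-q^m) = prod (1-q^m)^{-1} * prod (1+q^m)."""
--     # Phase 1: divisor sieve.  s[j] = sum of divisors e of j whose cofactor j//e is odd,
--     # accumulated per divisor e (odd multiples only) instead of per-number trial division.
--     s = [0] * (N + 1)
--     for e in range(1, N + 1):
--         m = 1
--         while e * m <= N:
--             s[e * m] += e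
--             m += 2
--     c = [2 * x for x in s]
--     # Phase 2: the convolution, unchanged.
--     pbar = [0] * (N + 1)
--     pbar[0] = 1
--     for n in range(1, N + 1):
--         acc = 0
--         for j in range(1, n + 1):
--             acc += c[j] * pbar[n - j]
--         pbar[n] = acc // n
--     return pbar
-- ===== Notes on version B (the rewrite author's own statement) =====
-- stated objective: alternative
-- what changed: Phase 1 replaces per-number sqrt trial division with a per-divisor sieve (for each e, add e at all odd multiples e*m <= N); the convolution phase is unchanged. Pre_ excludes N < 0, on which both A and B raise IndexError.
import Mathlib
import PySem

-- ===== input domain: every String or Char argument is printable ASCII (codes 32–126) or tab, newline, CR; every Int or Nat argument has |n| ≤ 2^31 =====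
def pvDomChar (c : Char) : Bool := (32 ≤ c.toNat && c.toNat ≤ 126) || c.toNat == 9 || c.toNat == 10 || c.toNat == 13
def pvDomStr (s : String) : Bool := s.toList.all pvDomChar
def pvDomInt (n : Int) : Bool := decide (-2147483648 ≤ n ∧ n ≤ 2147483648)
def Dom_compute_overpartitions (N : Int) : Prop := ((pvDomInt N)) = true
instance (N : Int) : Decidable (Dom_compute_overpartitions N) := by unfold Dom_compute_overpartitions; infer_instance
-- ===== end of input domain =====

-- B replaces A's per-number sqrt trial-division (phase 1) with a per-divisor sieve over odd
-- multiples; the convolution phase is identical in both sources and shared here as `convPhase`.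

-- ===== PORT A =====
-- A's inner `while d * d <= j` loop: s accumulates divisor contributions.
def trialA (j d s : Nat) : Nat :=
  if _h : d * d ≤ j then
    trialA j (d + 1)
      (s + (if j % d = 0 then
              (if (j / d) % 2 = 1 then d else 0) +
              (if d ≠ j / d ∧ d % 2 = 1 then j / d else 0)
            else 0))
  else s
termination_by j + 1 - d
decreasing_by
  rcases Nat.eq_zero_or_pos d with h0 | h0
  · omega
  · have : d ≤ d * d := Nat.le_mul_of_pos_left d h0
    omega

-- the inner sum of the convolution: sum_{j=1..n} c[j] * pbar[n-j]  (shared by both sources verbatim)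
def convSum (c pbar : List Int) (n : Nat) : Int :=
  (List.range n).foldl (fun s i => s + c.getD (i + 1) 0 * pbar.getD (n - (i + 1)) 0) 0

-- the convolution loop `for n in range(1, N+1): pbar[n] = s // n` (identical in A and B)
def convLoop (c pbar : List Int) (n N : Nat) : List Int :=
  if n ≤ N then
    convLoop c (pbar ++ [PySem.Int.floordiv (convSum c pbar n) (n : Int)]) (n + 1) N
  else pbar
termination_by N + 1 - n

def convPhase (c : List Int) (N : Nat) : List Int := convLoop c [1] 1 N

-- A's c array: c[0] = 0, c[j] = 2 * s(j) from trial division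
def cListA (n : Nat) : List Int :=
  (List.range (n + 1)).map (fun j => if j = 0 then 0 else 2 * ((trialA j 1 0 : Nat) : Int))

def compute_overpartitions (N : Int) : List Int :=
  convPhase (cListA N.toNat) N.toNat

-- ===== PORT B =====
-- B's inner sieve loop: for odd m while e*m <= N, s[e*m] += e
def sieveInner (N e m : Nat) (he : 1 ≤ e) (s : List Int) : List Int :=
  if e * m ≤ N then
    sieveInner N e (m + 2) he (s.set (e * m) (s.getD (e * m) 0 + (e : Int)))
  else s
termination_by N + 1 - e * m
decreasing_by
  have : e * (m + 2) = e * m + 2 * e := by ring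
  omega

-- B's outer loop over divisors e = 1..n, starting from s = [0]*(n+1)
def sieveOuter (n : Nat) : List Int :=
  (List.range n).foldl
    (fun s i => sieveInner n (i + 1) 1 (Nat.succ_le_succ (Nat.zero_le i)) s)
    (List.replicate (n + 1) 0)

-- c = [2*x for x in s]
def cListB (n : Nat) : List Int := (sieveOuter n).map (fun x => 2 * x)

def compute_overpartitions_alt (N : Int) : List Int :=
  convPhase (cListB N.toNat) N.toNat

-- ===== PRECONDITION & SPEC =====
-- Pre_ excludes N < 0, on which the Python A (and B) raises IndexError at `pbar[0] = 1`.
def Pre_compute_overpartitions (N : Int) : Prop := 0 ≤ N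
instance (N : Int) : Decidable (Pre_compute_overpartitions N) := by
  unfold Pre_compute_overpartitions; infer_instance

def pvWitness_compute_overpartitions : Int := (6)

def Spec_compute_overpartitions (N : Int) (out : List Int) : Prop := out = compute_overpartitions_alt N
instance (N : Int) (out : List Int) : Decidable (Spec_compute_overpartitions N out) := by unfold Spec_compute_overpartitions; infer_instance

-- ===== CLAIM (what is proved, stated in full; the proofs are below) =====
def Claim_equal_compute_overpartitions : Prop := ∀ (N : Int), Dom_compute_overpartitions N → Pre_compute_overpartitions N → Spec_compute_overpartitions N (compute_overpartitions N)

-- ===== LEMMAS AND PROOFS =====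

def contribA (j t : Nat) : Nat :=
  if j % t = 0 then
    (if (j / t) % 2 = 1 then t else 0) + (if t ≠ j / t ∧ t % 2 = 1 then j / t else 0)
  else 0

theorem Icc_split (d K : Nat) (h : d ≤ K) (f : Nat → Nat) :
    ∑ t ∈ Finset.Icc d K, f t = f d + ∑ t ∈ Finset.Icc (d+1) K, f t := by
  have he : Finset.Icc d K = insert d (Finset.Icc (d+1) K) := by
    ext t; simp [Finset.mem_Icc, Finset.mem_insert]; omega
  rw [he, Finset.sum_insert (by simp [Finset.mem_Icc])]

theorem trialA_eq_sum (j : Nat) : ∀ d s, trialA j d s = s + ∑ t ∈ Finset.Icc d (Nat.sqrt j), contribA j t := by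
  suffices H : ∀ fuel d s, Nat.sqrt j + 1 - d ≤ fuel →
      trialA j d s = s + ∑ t ∈ Finset.Icc d (Nat.sqrt j), contribA j t by
    intro d s; exact H _ d s le_rfl
  intro fuel
  induction fuel with
  | zero =>
    intro d s hf
    have hd : ¬ d * d ≤ j := by
      intro h; exact absurd (Nat.le_sqrt.mpr h) (by omega)
    rw [trialA, dif_neg hd, Finset.Icc_eq_empty (by omega), Finset.sum_empty]
    simp
  | succ n ih =>
    intro d s hf
    by_cases h : d * d ≤ j
    · have hd : d ≤ Nat.sqrt j := Nat.le_sqrt.mpr h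
      rw [trialA, dif_pos h, ih (d+1) _ (by omega), Icc_split d _ hd]
      have : contribA j d = (if j % d = 0 then
              (if (j / d) % 2 = 1 then d else 0) +
              (if d ≠ j / d ∧ d % 2 = 1 then j / d else 0)
            else 0) := rfl
      omega
    · have hd : Nat.sqrt j < d := not_le.mp fun hc => h (Nat.le_sqrt.mp hc)
      rw [trialA, dif_neg h, Finset.Icc_eq_empty (by omega), Finset.sum_empty]
      simp

def refSum (j : Nat) : Nat := ∑ d ∈ j.divisors, if (j / d) % 2 = 1 then d else 0

theorem sqrt_cond (j t : Nat) (ht : t ∣ j) (hj : 1 ≤ j) :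
    (t * t ≤ j ∧ t ≠ j / t) ↔ j < (j / t) * (j / t) := by
  have htp : 0 < t := Nat.pos_of_dvd_of_pos ht hj
  have hq : t * (j / t) = j := Nat.mul_div_cancel' ht
  have hqp : 0 < j / t := Nat.div_pos (Nat.le_of_dvd hj ht) htp
  constructor
  · rintro ⟨h1, h2⟩
    have hle : t ≤ j / t := Nat.le_of_mul_le_mul_left (by omega) htp
    have hlt : t < j / t := lt_of_le_of_ne hle h2
    calc j = t * (j / t) := hq.symm
    _ < (j / t) * (j / t) := (Nat.mul_lt_mul_right hqp).mpr hlt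
  · intro h
    have hlt : t < j / t := by
      by_contra hc
      have h2 : (j / t) * (j / t) ≤ (j / t) * t := Nat.mul_le_mul_left _ (Nat.le_of_not_lt hc)
      have h3 : (j / t) * t = j := by rw [Nat.mul_comm]; exact hq
      omega
    constructor
    · have : t * t < t * (j / t) := (Nat.mul_lt_mul_left htp).mpr hlt
      omega
    · omega

theorem trial_sum_eq_refSum (j : Nat) (hj : 1 ≤ j) :
    ∑ t ∈ Finset.Icc 1 (Nat.sqrt j), contribA j t = refSum j := by
  have e1 : ∑ t ∈ Finset.Icc 1 (Nat.sqrt j), contribA j t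
      = ∑ t ∈ (Finset.Icc 1 (Nat.sqrt j)).filter (fun t => j % t = 0),
          ((if (j / t) % 2 = 1 then t else 0) + (if t ≠ j / t ∧ t % 2 = 1 then j / t else 0)) := by
    rw [Finset.sum_filter]
    exact Finset.sum_congr rfl fun t _ => rfl
  have hset : (Finset.Icc 1 (Nat.sqrt j)).filter (fun t => j % t = 0)
      = j.divisors.filter (fun t => t * t ≤ j) := by
    ext t
    simp only [Finset.mem_filter, Nat.mem_divisors, Finset.mem_Icc]
    constructor
    · rintro ⟨⟨ht1, ht2⟩, hm⟩
      exact ⟨⟨Nat.dvd_iff_mod_eq_zero.mpr hm, by omega⟩, Nat.le_sqrt.mp ht2⟩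
    · rintro ⟨⟨hd, _⟩, hs⟩
      have htp : 0 < t := Nat.pos_of_dvd_of_pos hd hj
      exact ⟨⟨htp, Nat.le_sqrt.mpr hs⟩, Nat.dvd_iff_mod_eq_zero.mp hd⟩
  have e2 : ∑ t ∈ j.divisors.filter (fun t => t * t ≤ j),
          ((if (j / t) % 2 = 1 then t else 0) + (if t ≠ j / t ∧ t % 2 = 1 then j / t else 0))
      = (∑ t ∈ j.divisors, (if t * t ≤ j ∧ (j / t) % 2 = 1 then t else 0))
        + ∑ t ∈ j.divisors, (if t * t ≤ j ∧ t ≠ j / t ∧ t % 2 = 1 then j / t else 0) := by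
    rw [Finset.sum_filter, ← Finset.sum_add_distrib]
    refine Finset.sum_congr rfl fun t _ => ?_
    by_cases h1 : t * t ≤ j <;> simp [h1]
  have e3 : ∑ t ∈ j.divisors, (if t * t ≤ j ∧ t ≠ j / t ∧ t % 2 = 1 then j / t else 0)
      = ∑ e ∈ j.divisors, (if ¬ (e * e ≤ j) ∧ (j / e) % 2 = 1 then e else 0) := by
    refine Finset.sum_nbij' (fun t => j / t) (fun e => j / e) ?_ ?_ ?_ ?_ ?_
    · intro t ht
      rw [Nat.mem_divisors] at *
      exact ⟨Nat.div_dvd_of_dvd ht.1, by omega⟩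
    · intro e he
      rw [Nat.mem_divisors] at *
      exact ⟨Nat.div_dvd_of_dvd he.1, by omega⟩
    · intro t ht
      rw [Nat.mem_divisors] at ht
      exact Nat.div_div_self ht.1 (by omega)
    · intro e he
      rw [Nat.mem_divisors] at he
      exact Nat.div_div_self he.1 (by omega)
    · intro t ht
      rw [Nat.mem_divisors] at ht
      have hdd : j / (j / t) = t := Nat.div_div_self ht.1 (by omega)
      have hs := sqrt_cond j t ht.1 hj
      simp only [hdd]
      by_cases hc : t * t ≤ j ∧ t ≠ j / t
      · have h1 : ¬ (j / t * (j / t) ≤ j) := by have := hs.mp hc; omega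
        by_cases hodd : t % 2 = 1
        · rw [if_pos ⟨hc.1, hc.2, hodd⟩, if_pos ⟨h1, hodd⟩]
        · rw [if_neg (fun h => hodd h.2.2), if_neg (fun h => hodd h.2)]
      · have h1 : j / t * (j / t) ≤ j := by by_contra h; exact hc (hs.mpr (by omega))
        rw [if_neg (fun h => hc ⟨h.1, h.2.1⟩), if_neg (fun h => h.1 h1)]
  have e4 : (∑ t ∈ j.divisors, (if t * t ≤ j ∧ (j / t) % 2 = 1 then t else 0))
        + (∑ e ∈ j.divisors, (if ¬ (e * e ≤ j) ∧ (j / e) % 2 = 1 then e else 0)) = refSum j := by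
    unfold refSum
    rw [← Finset.sum_add_distrib]
    refine Finset.sum_congr rfl fun t _ => ?_
    by_cases h1 : t * t ≤ j <;> by_cases h2 : (j / t) % 2 = 1 <;> simp [h1, h2]
  rw [e1, hset, e2, e3, e4]

theorem getD_set_eq (l : List Int) (i k : Nat) (v : Int) :
    (l.set i v).getD k 0 = if i = k ∧ i < l.length then v else l.getD k 0 := by
  simp only [List.getD_eq_getElem?_getD, List.getElem?_set]
  split_ifs <;> simp_all
  omega

theorem sieveInner_length (N e m : Nat) (_he : 1 ≤ e) (s : List Int) :
    (sieveInner N e m _he s).length = s.length := by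
  fun_induction sieveInner <;> simp_all

theorem cond_far (N e m k : Nat) (_he : 1 ≤ e) (hN : N < e * m) :
    ¬ (k ≤ N ∧ e ∣ k ∧ m ≤ k / e ∧ (k / e) % 2 = 1) := by
  rintro ⟨h1, h2, h3, _⟩
  have hk : e * (k / e) = k := Nat.mul_div_cancel' h2
  have : e * m ≤ e * (k / e) := Nat.mul_le_mul_left _ h3
  omega

theorem sieveInner_getD (N e : Nat) (he : 1 ≤ e) :
    ∀ m (s : List Int), m % 2 = 1 → s.length = N + 1 → ∀ k,
      (sieveInner N e m he s).getD k 0 =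
        s.getD k 0 + (if k ≤ N ∧ e ∣ k ∧ m ≤ k / e ∧ (k / e) % 2 = 1 then (e : Int) else 0) := by
  suffices H : ∀ fuel m (s : List Int), N + 1 - e * m ≤ fuel → m % 2 = 1 → s.length = N + 1 → ∀ k,
      (sieveInner N e m he s).getD k 0 =
        s.getD k 0 + (if k ≤ N ∧ e ∣ k ∧ m ≤ k / e ∧ (k / e) % 2 = 1 then (e : Int) else 0) by
    intro m s hm hl k; exact H _ m s le_rfl hm hl k
  intro fuel
  induction fuel with
  | zero =>
    intro m s hb hm hl k
    have hgt : N < e * m := by omega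
    rw [sieveInner, if_neg (by omega), if_neg (cond_far N e m k he hgt)]
    omega
  | succ n ih =>
    intro m s hb hm hl k
    by_cases h : e * m ≤ N
    · have hee : e * (m + 2) = e * m + 2 * e := by ring
      rw [sieveInner, if_pos h,
        ih (m + 2) _ (by omega) (by omega) (by rw [List.length_set]; exact hl)]
      rw [getD_set_eq]
      by_cases hk : e * m = k
      · subst hk
        have hke : e * m / e = m := by rw [Nat.mul_div_cancel_left m (by omega)]
        have hdvd : e ∣ e * m := ⟨m, rfl⟩
        rw [if_pos ⟨rfl, by omega⟩, if_neg (by rw [hke]; omega),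
          if_pos ⟨by omega, hdvd, by omega, by rw [hke]; omega⟩]
        omega
      · rw [if_neg (fun hh => hk hh.1)]
        have hiff : (k ≤ N ∧ e ∣ k ∧ m + 2 ≤ k / e ∧ (k / e) % 2 = 1)
            ↔ (k ≤ N ∧ e ∣ k ∧ m ≤ k / e ∧ (k / e) % 2 = 1) := by
          constructor
          · rintro ⟨h1, h2, h3, h4⟩; exact ⟨h1, h2, by omega, h4⟩
          · rintro ⟨h1, h2, h3, h4⟩
            have hke : e * (k / e) = k := Nat.mul_div_cancel' h2
            have hne : k / e ≠ m := fun hq => hk (by rw [← hke, hq])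
            exact ⟨h1, h2, by omega, h4⟩
        rw [if_congr hiff rfl rfl]
    · rw [sieveInner, if_neg h, if_neg (cond_far N e m k he (by omega))]
      omega

theorem fold_length (n : Nat) : ∀ (l : List Nat) (s : List Int),
    (l.foldl (fun s i => sieveInner n (i + 1) 1 (Nat.succ_le_succ (Nat.zero_le i)) s) s).length
      = s.length := by
  intro l
  induction l with
  | nil => intro s; rfl
  | cons a t ih => intro s; rw [List.foldl_cons, ih, sieveInner_length]

theorem sieveOuter_length (n : Nat) : (sieveOuter n).length = n + 1 := by
  rw [sieveOuter, fold_length, List.length_replicate]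

theorem fold_getD (n : Nat) : ∀ m (s : List Int), s.length = n + 1 → ∀ k,
    ((List.range m).foldl (fun s i => sieveInner n (i + 1) 1 (Nat.succ_le_succ (Nat.zero_le i)) s) s).getD k 0
      = s.getD k 0 + ∑ e ∈ Finset.Icc 1 m,
          (if k ≤ n ∧ e ∣ k ∧ 1 ≤ k / e ∧ (k / e) % 2 = 1 then (e : Int) else 0) := by
  intro m
  induction m with
  | zero => intro s _ k; simp
  | succ m ih =>
    intro s hl k
    rw [List.range_succ, List.foldl_append, List.foldl_cons, List.foldl_nil,
      sieveInner_getD n (m + 1) (by omega) 1 _ (by omega) (by rw [fold_length]; exact hl) k,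
      ih s hl k, Finset.sum_Icc_succ_top (by omega)]
    ring

theorem sieveOuter_getD (n k : Nat) :
    (sieveOuter n).getD k 0 =
      ∑ e ∈ Finset.Icc 1 n, (if k ≤ n ∧ e ∣ k ∧ 1 ≤ k / e ∧ (k / e) % 2 = 1 then (e : Int) else 0) := by
  rw [sieveOuter, fold_getD n n _ (List.length_replicate) k]
  have : (List.replicate (n + 1) (0 : Int)).getD k 0 = 0 := by
    simp [List.getD_eq_getElem?_getD, List.getElem?_replicate]
    split_ifs <;> rfl
  rw [this, zero_add]

theorem sieveOuter_getD_eq_refSum (n j : Nat) (h1 : 1 ≤ j) (h2 : j ≤ n) :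
    (sieveOuter n).getD j 0 = (refSum j : Int) := by
  rw [sieveOuter_getD]
  have e1 : ∀ e ∈ Finset.Icc 1 n,
      (if j ≤ n ∧ e ∣ j ∧ 1 ≤ j / e ∧ (j / e) % 2 = 1 then (e : Int) else 0)
        = (if e ∣ j then (if (j / e) % 2 = 1 then (e : Int) else 0) else 0) := by
    intro e he
    simp only [Finset.mem_Icc] at he
    by_cases hd : e ∣ j
    · have hq : 1 ≤ j / e := Nat.div_pos (Nat.le_of_dvd (by omega) hd) (by omega)
      by_cases ho : (j / e) % 2 = 1
      · rw [if_pos ⟨h2, hd, hq, ho⟩, if_pos hd, if_pos ho]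
      · rw [if_neg (fun h => ho h.2.2.2), if_pos hd, if_neg ho]
    · rw [if_neg (fun h => hd h.2.1), if_neg hd]
  rw [Finset.sum_congr rfl e1, ← Finset.sum_filter]
  have hset : (Finset.Icc 1 n).filter (fun e => e ∣ j) = j.divisors := by
    ext e
    simp only [Finset.mem_filter, Nat.mem_divisors, Finset.mem_Icc]
    constructor
    · rintro ⟨_, hd⟩; exact ⟨hd, by omega⟩
    · rintro ⟨hd, _⟩
      exact ⟨⟨Nat.pos_of_dvd_of_pos hd h1, le_trans (Nat.le_of_dvd (by omega) hd) h2⟩, hd⟩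
  rw [hset]
  unfold refSum
  push_cast
  rfl

theorem cList_eq (n : Nat) : cListA n = cListB n := by
  apply List.ext_getElem
  · simp only [cListA, cListB, List.length_map, List.length_range, sieveOuter_length]
  · intro i hA hB
    simp only [cListA, List.length_map, List.length_range] at hA
    have hs : i < (sieveOuter n).length := by rw [sieveOuter_length]; omega
    simp only [cListA, cListB, List.getElem_map, List.getElem_range]
    have hgd : (sieveOuter n)[i] = (sieveOuter n).getD i 0 :=
      (List.getD_eq_getElem _ _ hs).symm
    rw [hgd]
    by_cases h0 : i = 0
    · subst h0
      have hz : (sieveOuter n).getD 0 0 = 0 := by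
        rw [sieveOuter_getD]
        refine Finset.sum_eq_zero fun e _ => ?_
        rw [if_neg]
        rintro ⟨_, _, hq, _⟩
        simp [Nat.zero_div] at hq
      rw [if_pos rfl, hz]
      ring
    · rw [if_neg h0, sieveOuter_getD_eq_refSum n i (by omega) (by omega),
        trialA_eq_sum i 1 0, trial_sum_eq_refSum i (by omega), zero_add]

-- ===== VERDICT (by name: the statement is the Claim_ definition above) =====
theorem compute_overpartitions_spec : Claim_equal_compute_overpartitions := by
  intro N _ _
  unfold Spec_compute_overpartitions compute_overpartitions compute_overpartitions_alt
  rw [cList_eq]
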